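-- pv_equiv track=rewrite | github.com/EcologyAndEvolution/project2100 | project2100.py | combine_counts
-- ===== SOURCE A (Python) =====
-- def combine_counts(counts, diff):
--     """
--     Given dictionary of {depth: [column, column, ...], ...}
--     this function will combine counts of nearby depths.
--     """
--     depths = sorted(counts.keys())
--     sets = [[depths[0]]]
--     for d in range(len(depths) - 1):
--         if abs(int(depths[d]) - int(depths[d+1])) <= diff:
--             sets[-1].append(depths[d+1])
--         else:
--             sets.append([depths[d+1]])
--     retval = {}
--     for set in sets:
--         columns = []
--         for depth in set:
--             columns.extend(counts[depth])
--         retval[set[0]] = columns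
--     return retval
-- ===== SOURCE B (Python) =====
-- def combine_counts(counts, diff):
--     """
--     Given dictionary of {depth: [column, column, ...], ...}
--     this function will combine counts of nearby depths.
--     """
--     depths = sorted(counts.keys())
--     cur = depths[0]
--     retval = {cur: list(counts[cur])}
--     prev = cur
--     for d in depths[1:]:
--         if abs(int(prev) - int(d)) <= diff:
--             retval[cur].extend(counts[d])
--         else:
--             cur = d
--             retval[cur] = list(counts[d])
--         prev = d
--     return retval
-- ===== Notes on version B (the rewrite author's own statement) =====
-- stated objective: simpler
-- what changed: Instead of first building a list-of-groups of keys and then a second pass that concatenates each group's columns into the result dict, B builds the result dict directly in one pass over the sorted keys, tracking only the current group key and the previous key.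
import Mathlib
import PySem

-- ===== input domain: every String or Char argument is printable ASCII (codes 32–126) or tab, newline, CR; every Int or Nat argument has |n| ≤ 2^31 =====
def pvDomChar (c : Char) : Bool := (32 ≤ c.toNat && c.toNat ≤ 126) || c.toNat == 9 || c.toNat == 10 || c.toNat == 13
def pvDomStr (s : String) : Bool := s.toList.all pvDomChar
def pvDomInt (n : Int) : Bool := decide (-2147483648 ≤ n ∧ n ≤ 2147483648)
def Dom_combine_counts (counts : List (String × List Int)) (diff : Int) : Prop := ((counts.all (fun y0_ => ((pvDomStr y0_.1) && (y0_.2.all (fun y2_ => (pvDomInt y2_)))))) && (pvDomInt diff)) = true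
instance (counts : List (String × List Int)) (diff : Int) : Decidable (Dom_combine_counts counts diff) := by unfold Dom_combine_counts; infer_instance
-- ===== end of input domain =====

-- B builds the result dict in one pass over the sorted keys (tracking only the current group key and the
-- previous key) instead of A's two passes (group the keys into a list of groups, then concatenate per group).

-- ===== PORT A =====
def combine_counts (counts : List (String × List Int)) (diff : Int) : List (String × List Int) :=
  let dct := PySem.Dict.ofList counts
  let depths := PySem.List.sorted dct.keys (fun x => x) false
  -- sets = [[depths[0]]]; for d in range(len(depths)-1): …
  let sets : List (List String) :=
    (PySem.List.pyRange 0 ((depths.length : Int) - 1) 1).foldl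
      (fun sets d =>
        if |(PySem.Int.ofStr? (PySem.List.pyGetD depths d "")).getD 0
            - (PySem.Int.ofStr? (PySem.List.pyGetD depths (d + 1) "")).getD 0| ≤ diff then
          -- sets[-1].append(depths[d+1])
          sets.dropLast ++ [PySem.List.pyGetD sets (-1) [] ++ [PySem.List.pyGetD depths (d + 1) ""]]
        else
          sets ++ [[PySem.List.pyGetD depths (d + 1) ""]])
      [[PySem.List.pyGetD depths 0 ""]]
  let retval : PySem.Dict String (List Int) :=
    sets.foldl
      (fun retval s =>
        let columns := s.foldl (fun columns depth => columns ++ dct.getD depth []) []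
        retval.insert (PySem.List.pyGetD s 0 "") columns)
      PySem.Dict.empty
  retval.items

-- ===== PORT B =====
def combine_counts_alt (counts : List (String × List Int)) (diff : Int) : List (String × List Int) :=
  let dct := PySem.Dict.ofList counts
  let depths := PySem.List.sorted dct.keys (fun x => x) false
  match depths with
  | [] => []  -- Python raises IndexError at depths[0] here; outside Pre_
  | cur0 :: rest =>  -- cur = depths[0]; retval = {cur: list(counts[cur])}; for d in depths[1:]: …
    let st := rest.foldl
      (fun (st : PySem.Dict String (List Int) × String × String) d =>
        if |(PySem.Int.ofStr? st.2.2).getD 0 - (PySem.Int.ofStr? d).getD 0| ≤ diff then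
          (st.1.modify st.2.1 [] (· ++ dct.getD d []), st.2.1, d)
        else
          (st.1.insert d (dct.getD d []), d, d))
      ((PySem.Dict.empty).insert cur0 (dct.getD cur0 []), cur0, cur0)
    st.1.items

-- ===== PRECONDITION & SPEC =====
-- Pre_ holds exactly where Python A returns normally: a nonempty dict (else IndexError at depths[0]) whose
-- keys, when there are at least two of them, are all parseable by int() (else ValueError in the loop).
def Pre_combine_counts (counts : List (String × List Int)) (diff : Int) : Prop :=
  (PySem.Dict.ofList counts).keys ≠ [] ∧
  (1 < (PySem.Dict.ofList counts).keys.length →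
    ∀ k ∈ (PySem.Dict.ofList counts).keys, PySem.Int.ofStr? k ≠ none)
instance (counts : List (String × List Int)) (diff : Int) : Decidable (Pre_combine_counts counts diff) := by
  unfold Pre_combine_counts; infer_instance
def pvWitness_combine_counts : (List (String × List Int)) × Int :=
  ([("1", [5]), ("3", [7, 8]), ("10", [2])], 1)
def Spec_combine_counts (counts : List (String × List Int)) (diff : Int) (out : List (String × List Int)) : Prop := out = combine_counts_alt counts diff
instance (counts : List (String × List Int)) (diff : Int) (out : List (String × List Int)) : Decidable (Spec_combine_counts counts diff out) := by unfold Spec_combine_counts; infer_instance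

-- ===== CLAIM (what is proved, stated in full; the proofs are below) =====
def Claim_equal_combine_counts : Prop := ∀ (counts : List (String × List Int)) (diff : Int), Dom_combine_counts counts diff → Pre_combine_counts counts diff → Spec_combine_counts counts diff (combine_counts counts diff)

-- ===== LEMMAS AND PROOFS =====

-- structural form of A's index loop: a fold over consecutive pairs of the list
def pairFold {σ : Type} (g : σ → String → String → σ) : σ → String → List String → σ
  | acc, _, [] => acc
  | acc, a, b :: t => pairFold g (g acc a b) b t

theorem foldl_pyRange_shift {σ : Type} (h : σ → Int → σ) (a b : Int) (acc : σ) :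
    (PySem.List.pyRange (a + 1) (b + 1) 1).foldl h acc
      = (PySem.List.pyRange a b 1).foldl (fun s i => h s (i + 1)) acc := by
  rw [PySem.List.pyRange_one, PySem.List.pyRange_one, List.foldl_map, List.foldl_map]
  have hba : b + 1 - (a + 1) = b - a := by ring
  rw [hba]
  apply PySem.List.foldl_congr_mem
  intro s i _
  have : a + 1 + (i : Int) = a + i + 1 := by ring
  rw [this]

theorem pyGetD_cons_add_one {α : Type} (x : α) (l : List α) (i : Int) (d : α) (h : 0 ≤ i) :
    PySem.List.pyGetD (x :: l) (i + 1) d = PySem.List.pyGetD l i d := by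
  obtain ⟨n, rfl⟩ := Int.eq_ofNat_of_zero_le h
  have : (n : Int) + 1 = ((n + 1 : Nat) : Int) := by push_cast; ring
  rw [this, PySem.List.pyGetD_natCast, PySem.List.pyGetD_natCast]
  simp [List.getD]

theorem idx_fold_eq_pairFold {σ : Type} (g : σ → String → String → σ) :
    ∀ (xs : List String) (a : String) (acc : σ),
    (PySem.List.pyRange 0 (((a :: xs).length : Int) - 1) 1).foldl
        (fun s i => g s (PySem.List.pyGetD (a :: xs) i "") (PySem.List.pyGetD (a :: xs) (i + 1) "")) acc
      = pairFold g acc a xs := by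
  intro xs
  induction xs with
  | nil =>
    intro a acc
    simp [PySem.List.pyRange_one_eq_nil, pairFold]
  | cons b t ih =>
    intro a acc
    have hlen : ((a :: b :: t).length : Int) - 1 = ((b :: t).length : Int) := by
      push_cast [List.length_cons]; ring
    rw [hlen]
    have hpos : (0 : Int) < ((b :: t).length : Int) := by exact_mod_cast Nat.succ_pos t.length
    rw [PySem.List.pyRange_one_cons hpos, List.foldl_cons]
    have h01 : PySem.List.pyGetD (a :: b :: t) (0 : Int) "" = a := PySem.List.pyGetD_zero_cons a _ ""
    have h1 : PySem.List.pyGetD (a :: b :: t) ((0 : Int) + 1) "" = b := by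
      rw [pyGetD_cons_add_one a _ 0 "" le_rfl]; exact PySem.List.pyGetD_zero_cons b t ""
    rw [h01, h1]
    have hlen2 : ((b :: t).length : Int) = ((b :: t).length : Int) - 1 + 1 := by ring
    rw [hlen2, show (0 : Int) = 0 + 1 - 1 by ring]
    rw [show (0 : Int) + 1 - 1 = 0 by ring, show ((0 : Int) + 1) = 0 + 1 by rfl]
    rw [foldl_pyRange_shift]
    have hcong : (PySem.List.pyRange 0 (((b :: t).length : Int) - 1) 1).foldl
        (fun s i => g s (PySem.List.pyGetD (a :: b :: t) (i + 1) "")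
          (PySem.List.pyGetD (a :: b :: t) (i + 1 + 1) "")) (g acc a b)
      = (PySem.List.pyRange 0 (((b :: t).length : Int) - 1) 1).foldl
        (fun s i => g s (PySem.List.pyGetD (b :: t) i "") (PySem.List.pyGetD (b :: t) (i + 1) ""))
        (g acc a b) := by
      apply PySem.List.foldl_congr_mem
      intro s i hi
      have h0i : 0 ≤ i := ((PySem.List.mem_pyRange_one).1 hi).1
      rw [pyGetD_cons_add_one a _ i "" h0i, pyGetD_cons_add_one a _ (i + 1) "" (by omega)]
    rw [hcong, ih b (g acc a b)]
    rfl

theorem colsOf_append (dct : PySem.Dict String (List Int)) (s : List String) (b : String) :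
    (s ++ [b]).foldl (fun c depth => c ++ dct.getD depth []) []
      = s.foldl (fun c depth => c ++ dct.getD depth []) [] ++ dct.getD b [] := by
  rw [List.foldl_append]; rfl

theorem getD_of_items_eq (d : PySem.Dict String (List Int)) (k : String) (v : List Int)
    (hmem : (k, v) ∈ d.items) (hnd : d.keys.Nodup) : d.getD k [] = v := by
  have := PySem.Dict.get?_of_mem_items d hmem hnd
  simp [PySem.Dict.getD, this]

theorem insert_fresh_items (d : PySem.Dict String (List Int)) (k : String) (v : List Int)
    (h : d.contains k = false) : (d.insert k v).items = d.items ++ [(k, v)] := by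
  have := PySem.Dict.items_foldl_insert_fresh (l := [k]) (k := fun x => x) (v := fun _ => v) (d := d)
    (by intro a ha; simp at ha; subst ha; exact h) (by simp)
  simpa using this

-- the invariant-carrying induction: A's remaining grouping followed by A's dict build
-- equals B's remaining single pass started from the partially built dict `ret`
theorem main_ind (dct : PySem.Dict String (List Int)) (diff : Int) :
    ∀ (rest : List String) (prev cur : String) (init : List (List String)) (gt : List String)
      (ret : PySem.Dict String (List Int)),
      rest.Nodup →
      (((init ++ [cur :: gt]).map (fun s => PySem.List.pyGetD s 0 "")).Nodup) →
      (∀ b ∈ rest, b ∉ (init ++ [cur :: gt]).map (fun s => PySem.List.pyGetD s 0 "")) →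
      ret.items = (init ++ [cur :: gt]).map
        (fun s => (PySem.List.pyGetD s 0 "", s.foldl (fun c depth => c ++ dct.getD depth []) [])) →
      ((pairFold
          (fun sets x y =>
            if |(PySem.Int.ofStr? x).getD 0 - (PySem.Int.ofStr? y).getD 0| ≤ diff then
              sets.dropLast ++ [PySem.List.pyGetD sets (-1) [] ++ [y]]
            else sets ++ [[y]])
          (init ++ [cur :: gt]) prev rest).foldl
        (fun retval s =>
          retval.insert (PySem.List.pyGetD s 0 "")
            (s.foldl (fun c depth => c ++ dct.getD depth []) []))
        PySem.Dict.empty).items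
      = (rest.foldl
          (fun (st : PySem.Dict String (List Int) × String × String) d =>
            if |(PySem.Int.ofStr? st.2.2).getD 0 - (PySem.Int.ofStr? d).getD 0| ≤ diff then
              (st.1.modify st.2.1 [] (· ++ dct.getD d []), st.2.1, d)
            else (st.1.insert d (dct.getD d []), d, d))
          (ret, cur, prev)).1.items := by
  intro rest
  induction rest with
  | nil =>
    intro prev cur init gt ret _ hnd _ hret
    simp only [pairFold, List.foldl_nil]
    rw [PySem.Dict.items_foldl_insert_fresh (init ++ [cur :: gt])
          (fun s => PySem.List.pyGetD s 0 "")
          (fun s => s.foldl (fun c depth => c ++ dct.getD depth []) []) PySem.Dict.empty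
          (by intro a _; exact PySem.Dict.contains_empty _) hnd]
    rw [hret]; rfl
  | cons b t ih =>
    intro prev cur init gt ret hndr hnd hfresh hret
    have hkeys : ret.keys = (init ++ [cur :: gt]).map (fun s => PySem.List.pyGetD s 0 "") := by
      simp only [PySem.Dict.keys, hret, List.map_map]; rfl
    have hndk : ret.keys.Nodup := by rw [hkeys]; exact hnd
    have hcurmem : cur ∈ ret.keys := by
      rw [hkeys]; refine List.mem_map.2 ⟨cur :: gt, by simp, ?_⟩
      exact PySem.List.pyGetD_zero_cons cur gt ""
    simp only [pairFold, List.foldl_cons]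
    by_cases hc : |(PySem.Int.ofStr? prev).getD 0 - (PySem.Int.ofStr? b).getD 0| ≤ diff
    · rw [if_pos hc, if_pos hc]
      have hA : (init ++ [cur :: gt]).dropLast
            ++ [PySem.List.pyGetD (init ++ [cur :: gt]) (-1) [] ++ [b]]
          = init ++ [cur :: (gt ++ [b])] := by
        rw [List.dropLast_concat, PySem.List.pyGetD_neg_one_append_singleton]
        rfl
      rw [hA]
      -- the list of heads is unchanged
      have hheads : (init ++ [cur :: (gt ++ [b])]).map (fun s => PySem.List.pyGetD s 0 "")
          = (init ++ [cur :: gt]).map (fun s => PySem.List.pyGetD s 0 "") := by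
        simp [PySem.List.pyGetD_zero_cons]
      have hcurne : ∀ s ∈ init, PySem.List.pyGetD s 0 "" ≠ cur := by
        intro s hs
        have : cur ∉ init.map (fun s => PySem.List.pyGetD s 0 "") := by
          have := hnd
          simp only [List.map_append, List.map_cons, List.map_nil,
            PySem.List.pyGetD_zero_cons] at this
          intro hmem
          rcases List.nodup_append.1 (by simpa using this) with ⟨-, -, hdisj⟩
          exact hdisj _ hmem cur (by simp) rfl
        intro he; exact this (he ▸ List.mem_map_of_mem hs)
      apply ih b cur init (gt ++ [b]) (ret.modify cur [] (· ++ dct.getD b []))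
      · exact (List.nodup_cons.1 hndr).2
      · rw [hheads]; exact hnd
      · intro b' hb'; rw [hheads]; exact hfresh b' (List.mem_cons_of_mem b hb')
      · -- items of the modified dict
        have hndk' : (ret.modify cur [] (· ++ dct.getD b [])).keys.Nodup := by
          rw [PySem.Dict.keys_modify, PySem.Dict.keys_insert_of_contains ret _
            ((PySem.Dict.contains_iff_mem_keys ret cur).2 hcurmem)]
          exact hndk
        rw [PySem.Dict.items_eq_map_keys _ hndk' []]
        rw [PySem.Dict.keys_modify, PySem.Dict.keys_insert_of_contains ret _
            ((PySem.Dict.contains_iff_mem_keys ret cur).2 hcurmem), hkeys]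
        rw [List.map_map, List.map_append, List.map_append]
        congr 1
        · apply List.map_congr_left
          intro s hs
          have hne := hcurne s hs
          simp only [Function.comp_apply]
          rw [PySem.Dict.getD_modify_of_ne ret [] _ hne]
          refine congrArg _ (getD_of_items_eq ret _ _ ?_ hndk)
          rw [hret, List.map_append]
          exact List.mem_append_left _ (List.mem_map_of_mem hs)
        · simp only [List.map_cons, List.map_nil, Function.comp_apply,
            PySem.List.pyGetD_zero_cons]
          rw [PySem.Dict.getD_modify_self]
          have hcg : ret.getD cur [] = (cur :: gt).foldl (fun c depth => c ++ dct.getD depth []) [] := by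
            refine getD_of_items_eq ret _ _ ?_ hndk
            rw [hret, List.map_append]
            refine List.mem_append_right _ ?_
            simp [PySem.List.pyGetD_zero_cons]
          rw [hcg, show cur :: (gt ++ [b]) = (cur :: gt) ++ [b] from rfl, colsOf_append]
    · rw [if_neg hc, if_neg hc]
      have hbfresh : b ∉ (init ++ [cur :: gt]).map (fun s => PySem.List.pyGetD s 0 "") :=
        hfresh b (List.mem_cons_self)
      have hA : (init ++ [cur :: gt]) ++ [[b]] = (init ++ [cur :: gt]) ++ [b :: ([] : List String)] := rfl
      rw [hA]
      apply ih b b (init ++ [cur :: gt]) [] (ret.insert b (dct.getD b []))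
      · exact (List.nodup_cons.1 hndr).2
      · rw [List.map_append]
        simp only [List.map_cons, List.map_nil, PySem.List.pyGetD_zero_cons]
        rw [List.nodup_append]
        refine ⟨hnd, List.nodup_singleton b, ?_⟩
        intro a ha b2 hb2
        simp only [List.mem_singleton] at hb2
        subst hb2
        intro he
        exact hbfresh (he ▸ ha)
      · intro b' hb'
        rw [List.map_append]
        simp only [List.map_cons, List.map_nil, PySem.List.pyGetD_zero_cons]
        intro hmem
        rcases List.mem_append.1 hmem with h | h
        · exact hfresh b' (List.mem_cons_of_mem b hb') h
        · simp only [List.mem_singleton] at h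
          exact (List.nodup_cons.1 hndr).1 (h ▸ hb')
      · rw [insert_fresh_items ret b _ (by
          rw [← Bool.not_eq_true, PySem.Dict.contains_iff_mem_keys, hkeys]
          exact hbfresh)]
        rw [hret, List.map_append]
        simp [PySem.List.pyGetD_zero_cons]

-- ===== VERDICT (by name: the statement is the Claim_ definition above) =====
theorem combine_counts_spec : Claim_equal_combine_counts := by
  intro counts diff _ hpre
  unfold Spec_combine_counts
  obtain ⟨hne, -⟩ := hpre
  simp only [combine_counts, combine_counts_alt]
  rcases hsort : PySem.List.sorted (PySem.Dict.ofList counts).keys (fun x => x) false with _ | ⟨d0, rest⟩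
  · exact absurd ((PySem.List.sorted_eq_nil_iff _ _ _).1 hsort) hne
  · have hndall : (d0 :: rest).Nodup := by
      rw [← hsort]
      exact ((PySem.List.sorted_perm (PySem.Dict.ofList counts).keys (fun x => x) false).symm).nodup
        (PySem.Dict.nodup_keys_ofList counts)
    rw [show PySem.List.pyGetD (d0 :: rest) (0 : Int) "" = d0 from
      PySem.List.pyGetD_zero_cons d0 rest ""]
    rw [idx_fold_eq_pairFold
      (fun sets x y =>
        if |(PySem.Int.ofStr? x).getD 0 - (PySem.Int.ofStr? y).getD 0| ≤ diff then
          sets.dropLast ++ [PySem.List.pyGetD sets (-1) [] ++ [y]]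
        else sets ++ [[y]]) rest d0 [[d0]]]
    have := main_ind (PySem.Dict.ofList counts) diff rest d0 d0 [] []
      ((PySem.Dict.empty).insert d0 ((PySem.Dict.ofList counts).getD d0 []))
      (List.nodup_cons.1 hndall).2
      (by simp [PySem.List.pyGetD_zero_cons])
      (by
        intro b hb
        simp only [List.nil_append, List.map_cons, List.map_nil, PySem.List.pyGetD_zero_cons]
        simp only [List.mem_singleton]
        intro he
        exact (List.nodup_cons.1 hndall).1 (he ▸ hb))
      (by
        rw [insert_fresh_items _ _ _ (PySem.Dict.contains_empty d0)]
        simp [PySem.List.pyGetD_zero_cons, PySem.Dict.empty])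
    simpa using this
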